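-- pv_equiv track=rewrite | github.com/alexicon33/Ising-model | Code/graph_models.py | cayley_tree
-- ===== SOURCE A (Python) =====
-- def cayley_tree(N):
--     res = [[] for _ in range(N)]
--     res[0] += [1, 2, 3]
--     res[1].append(0)
--     res[2].append(0)
--     res[3].append(0)
--     for i in range(1, N):
--         if 2 * i + 2 < N:
--             res[i].append(2 * i + 2)
--             res[2 * i + 2].append(i)
--         if 2 * i + 3 < N:
--             res[i].append(2 * i + 3)
--             res[2 * i + 3].append(i)
--
--     return res
-- ===== SOURCE B (Python) =====
-- def cayley_tree(N):
--     def row(i):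
--         if i == 0:
--             return [1, 2, 3]
--         nbrs = [0] if i <= 3 else [(i - 2) // 2]
--         if 2 * i + 2 < N:
--             nbrs.append(2 * i + 2)
--         if 2 * i + 3 < N:
--             nbrs.append(2 * i + 3)
--         return nbrs
--     return [row(i) for i in range(N)]
-- ===== Notes on version B (the rewrite author's own statement) =====
-- stated objective: simpler
-- what changed: Replaced A's in-place array mutation (parent loop appending guarded children into shared lists) by a non-mutating per-row closed form: each node's row [parent, 2i+2 if in range, 2i+3 if in range] is computed independently in one list comprehension.
import Mathlib
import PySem

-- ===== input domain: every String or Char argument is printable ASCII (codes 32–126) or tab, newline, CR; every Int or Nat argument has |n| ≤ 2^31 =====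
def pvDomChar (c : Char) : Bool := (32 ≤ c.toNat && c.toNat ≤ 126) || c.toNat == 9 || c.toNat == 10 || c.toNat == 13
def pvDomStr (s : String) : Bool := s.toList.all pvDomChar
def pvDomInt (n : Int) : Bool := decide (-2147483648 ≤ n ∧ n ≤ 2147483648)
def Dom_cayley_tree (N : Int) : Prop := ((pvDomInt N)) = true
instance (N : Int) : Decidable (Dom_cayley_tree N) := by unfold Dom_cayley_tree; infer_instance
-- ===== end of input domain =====

-- B replaces A's mutating parent-loop by a non-mutating per-row closed form: each node's
-- adjacency row [parent, children] is computed independently and the result is a single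
-- list comprehension (objective: simpler).

-- ===== PORT A =====

-- res[i].append(x) for a nonnegative in-range index i (all appends in A
-- use indices that are in range whenever the program returns, i.e. on Pre_).
def pvAppendAt (res : List (List Int)) (i : Int) (x : Int) : List (List Int) :=
  res.set i.toNat ((res.getD i.toNat []) ++ [x])

def cayley_tree (N : Int) : List (List Int) :=
  let res := List.replicate N.toNat ([] : List Int)
  let res := res.set 0 ((res.getD 0 []) ++ [1, 2, 3])
  let res := pvAppendAt res 1 0
  let res := pvAppendAt res 2 0
  let res := pvAppendAt res 3 0
  (PySem.List.pyRange 1 N 1).foldl (fun res i =>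
    let res := if 2 * i + 2 < N then
        pvAppendAt (pvAppendAt res i (2 * i + 2)) (2 * i + 2) i
      else res
    if 2 * i + 3 < N then
        pvAppendAt (pvAppendAt res i (2 * i + 3)) (2 * i + 3) i
      else res) res

-- ===== PORT B =====
-- Source B's inner helper: the adjacency row of node i, built directly.
def pvRow (N i : Int) : List Int :=
  if i = 0 then [1, 2, 3]
  else
    (if i ≤ 3 then [0] else [PySem.Int.floordiv (i - 2) 2]) ++
    (if 2 * i + 2 < N then [2 * i + 2] else []) ++
    (if 2 * i + 3 < N then [2 * i + 3] else [])

def cayley_tree_alt (N : Int) : List (List Int) :=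
  (PySem.List.pyRange 0 N 1).map (pvRow N)

-- ===== PRECONDITION & SPEC =====
-- A raises IndexError for every N < 4 (res[0] through res[3] are accessed unconditionally).
def Pre_cayley_tree (N : Int) : Prop := 4 ≤ N
instance (N : Int) : Decidable (Pre_cayley_tree N) := by unfold Pre_cayley_tree; infer_instance
def pvWitness_cayley_tree : Int := (7)

def Spec_cayley_tree (N : Int) (out : List (List Int)) : Prop := out = cayley_tree_alt N
instance (N : Int) (out : List (List Int)) : Decidable (Spec_cayley_tree N out) := by unfold Spec_cayley_tree; infer_instance

-- ===== CLAIM (what is proved, stated in full; the proofs are below) =====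
def Claim_equal_cayley_tree : Prop := ∀ (N : Int), Dom_cayley_tree N → Pre_cayley_tree N → Spec_cayley_tree N (cayley_tree N)

-- ===== LEMMAS AND PROOFS =====

-- The elementary edge operation both programs perform: one append of parent→child and child→parent.
def pvStepB (res : List (List Int)) (j : Int) : List (List Int) :=
  let p := PySem.Int.floordiv (j - 2) 2
  pvAppendAt (pvAppendAt res j p) p j

-- The children A's iteration i contributes, in order.
def pvChildren (N i : Int) : List Int :=
  (if 2 * i + 2 < N then [2 * i + 2] else []) ++ (if 2 * i + 3 < N then [2 * i + 3] else [])

-- The state of A's array after the edges of all children < m have been inserted.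
def pvRowM (m i : Int) : List Int :=
  if i = 0 then [1, 2, 3]
  else if i ≤ 3 then [0] ++ pvChildren m i
  else if i < m then [PySem.Int.floordiv (i - 2) 2] ++ pvChildren m i
  else []

theorem pvAppendAt_comm (res : List (List Int)) (a b x y : Int)
    (h : a.toNat ≠ b.toNat) :
    pvAppendAt (pvAppendAt res a x) b y = pvAppendAt (pvAppendAt res b y) a x := by
  simp only [pvAppendAt, List.getD_eq_getElem?_getD]
  rw [List.getElem?_set_ne h, List.getElem?_set_ne (Ne.symm h), List.set_comm _ _ h]

theorem pvStepA_eq (N : Int) (res : List (List Int)) (i : Int) (hi : 1 ≤ i) :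
    (if 2 * i + 3 < N then
        pvAppendAt (pvAppendAt
          (if 2 * i + 2 < N then pvAppendAt (pvAppendAt res i (2 * i + 2)) (2 * i + 2) i else res)
          i (2 * i + 3)) (2 * i + 3) i
      else if 2 * i + 2 < N then pvAppendAt (pvAppendAt res i (2 * i + 2)) (2 * i + 2) i else res)
    = (pvChildren N i).foldl pvStepB res := by
  have h2 : PySem.Int.floordiv (2 * i + 2 - 2) 2 = i := by
    rw [PySem.Int.floordiv_eq_ediv_of_pos (by norm_num)]; omega
  have h3 : PySem.Int.floordiv (2 * i + 3 - 2) 2 = i := by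
    rw [PySem.Int.floordiv_eq_ediv_of_pos (by norm_num)]; omega
  by_cases hB : 2 * i + 2 < N <;> by_cases hC : 2 * i + 3 < N <;>
    simp only [pvChildren, hB, hC, if_true, if_false, List.append_nil, List.nil_append,
      List.singleton_append, List.foldl_cons, List.foldl_nil, pvStepB, h2, h3]
  · rw [pvAppendAt_comm res i (2 * i + 2) (2 * i + 2) i (by omega),
        pvAppendAt_comm _ i (2 * i + 3) (2 * i + 3) i (by omega)]
  · rw [pvAppendAt_comm res i (2 * i + 2) (2 * i + 2) i (by omega)]
  · rw [pvAppendAt_comm res i (2 * i + 3) (2 * i + 3) i (by omega)]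

-- Splitting A's fold into the per-child operations.
theorem foldl_flatMap_children (N : Int) (l : List Int) (hl : ∀ i ∈ l, 1 ≤ i)
    (res : List (List Int)) :
    l.foldl (fun res i =>
      let res := if 2 * i + 2 < N then
          pvAppendAt (pvAppendAt res i (2 * i + 2)) (2 * i + 2) i
        else res
      if 2 * i + 3 < N then
          pvAppendAt (pvAppendAt res i (2 * i + 3)) (2 * i + 3) i
        else res) res
    = (l.flatMap (pvChildren N)).foldl pvStepB res := by
  induction l generalizing res with
  | nil => rfl
  | cons a t ih =>
    simp only [List.foldl_cons, List.flatMap_cons, List.foldl_append]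
    rw [show (if 2 * a + 3 < N then
        pvAppendAt (pvAppendAt
          (if 2 * a + 2 < N then pvAppendAt (pvAppendAt res a (2 * a + 2)) (2 * a + 2) a else res)
          a (2 * a + 3)) (2 * a + 3) a
      else if 2 * a + 2 < N then pvAppendAt (pvAppendAt res a (2 * a + 2)) (2 * a + 2) a else res)
      = (pvChildren N a).foldl pvStepB res from pvStepA_eq N res a (hl a (by simp)),
      ih (fun i hi => hl i (by simp [hi]))]

-- The children listed for i = 1 … m-1 are exactly 4 … min(2m+2,N)-1, in order.
theorem flatMap_children_eq (N : Int) (hN : 4 ≤ N) (t : Nat) :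
    (PySem.List.pyRange 1 (1 + (t : Int)) 1).flatMap (pvChildren N)
      = PySem.List.pyRange 4 (min (2 * (t : Int) + 4) N) 1 := by
  induction t with
  | zero =>
    rw [show ((0:Nat):Int) = 0 by norm_num]
    rw [PySem.List.pyRange_one_eq_nil (by omega), show min (2*(0:Int)+4) N = 4 by omega,
        PySem.List.pyRange_one_eq_nil (by omega)]
    rfl
  | succ k ih =>
    push_cast
    rw [show (1:Int) + ((k:Int) + 1) = (1 + (k:Int)) + 1 by ring,
        PySem.List.pyRange_one_succ_right (by omega), List.flatMap_append, ih]
    simp only [List.flatMap_cons, List.flatMap_nil, List.append_nil, pvChildren]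
    by_cases h2 : 2 * (1 + (k:Int)) + 2 < N
    · by_cases h3 : 2 * (1 + (k:Int)) + 3 < N
      · rw [if_pos h2, if_pos h3,
            show min (2*(k:Int)+4) N = 2*(k:Int)+4 by omega,
            show min (2*((k:Int)+1)+4) N = (2*(k:Int)+4+1)+1 by omega,
            PySem.List.pyRange_one_succ_right (by omega),
            PySem.List.pyRange_one_succ_right (by omega)]
        simp only [List.append_assoc, List.cons_append, List.nil_append]
        norm_num
        constructor <;> omega
      · rw [if_pos h2, if_neg h3,
            show min (2*(k:Int)+4) N = 2*(k:Int)+4 by omega,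
            show min (2*((k:Int)+1)+4) N = (2*(k:Int)+4)+1 by omega,
            PySem.List.pyRange_one_succ_right (by omega)]
        simp only [List.cons_append, List.nil_append]
        norm_num
        omega
    · rw [if_neg h2, if_neg (by omega : ¬ 2 * (1 + (k:Int)) + 3 < N),
          show min (2*(k:Int)+4) N = N by omega,
          show min (2*((k:Int)+1)+4) N = N by omega]
      simp

theorem set_append_map_pyRange (N : Int) (f : Int → List Int) (i : Int) (ys : List Int)
    (h0 : 0 ≤ i) (hi : i < N) :
    ((PySem.List.pyRange 0 N 1).map f).set i.toNat
        ((((PySem.List.pyRange 0 N 1).map f).getD i.toNat []) ++ ys)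
      = (PySem.List.pyRange 0 N 1).map (fun k => if k = i then f k ++ ys else f k) := by
  have hlen : ((PySem.List.pyRange 0 N 1).map f).length = N.toNat := by
    simp [PySem.List.length_pyRange_one]
  have hi' : i.toNat < N.toNat := by omega
  have hr : ∀ (k : Nat) (hk : k < N.toNat), (PySem.List.pyRange 0 N 1)[k]'(by simp [PySem.List.length_pyRange_one]; omega) = (k : Int) := by
    intro k hk
    rw [PySem.List.getElem_pyRange_one]
    omega
  have hget : ((PySem.List.pyRange 0 N 1).map f).getD i.toNat [] = f i := by
    rw [List.getD_eq_getElem?_getD, List.getElem?_eq_getElem (by omega), List.getElem_map, hr i.toNat hi']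
    simp
    congr 1
    omega
  rw [hget]
  apply List.ext_getElem (by simp)
  intro k hk1 hk2
  have hkN : k < N.toNat := by simpa [hlen] using hk1
  rw [List.getElem_set, List.getElem_map, List.getElem_map, hr k hkN]
  by_cases hki : i.toNat = k
  · have hk' : (k : Int) = i := by omega
    rw [if_pos hki, if_pos hk', hk']
  · rw [if_neg hki, if_neg (by omega)]

theorem pvAppendAt_map_pyRange (N : Int) (f : Int → List Int) (i x : Int)
    (h0 : 0 ≤ i) (hi : i < N) :
    pvAppendAt ((PySem.List.pyRange 0 N 1).map f) i x
      = (PySem.List.pyRange 0 N 1).map (fun k => if k = i then f k ++ [x] else f k) :=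
  set_append_map_pyRange N f i [x] h0 hi

theorem init_eq (N : Int) (hN : 4 ≤ N) :
    (let res := List.replicate N.toNat ([] : List Int)
     let res := res.set 0 ((res.getD 0 []) ++ [1, 2, 3])
     let res := pvAppendAt res 1 0
     let res := pvAppendAt res 2 0
     pvAppendAt res 3 0)
    = (PySem.List.pyRange 0 N 1).map (pvRowM 4) := by
  have hrep : List.replicate N.toNat ([] : List Int)
      = (PySem.List.pyRange 0 N 1).map (fun _ => ([] : List Int)) := by
    rw [List.map_const']
    simp [PySem.List.length_pyRange_one]
  simp only [hrep]
  rw [show ((0:Nat) : Nat) = (0:Int).toNat from rfl] -- align set 0 with set (0:Int).toNat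
  rw [set_append_map_pyRange N _ 0 [1,2,3] (by omega) (by omega),
      pvAppendAt_map_pyRange N _ 1 0 (by omega) (by omega),
      pvAppendAt_map_pyRange N _ 2 0 (by omega) (by omega),
      pvAppendAt_map_pyRange N _ 3 0 (by omega) (by omega)]
  refine List.map_congr_left (fun k hk => ?_)
  obtain ⟨hk0, hkN⟩ := PySem.List.mem_pyRange_one.mp hk
  simp only [pvRowM, pvChildren]
  split_ifs <;> simp_all <;> omega

theorem rowM_at_p (m p : Int) (h1 : 1 <= p) (h2 : 2 * p + 2 <= m) (h3 : m <= 2 * p + 3) :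
    pvRowM m p ++ [m] = pvRowM (m + 1) p := by
  simp only [pvRowM, pvChildren]
  generalize PySem.Int.floordiv (p - 2) 2 = q
  split_ifs <;> first | rfl | omega | (simp_all; omega)

theorem rowM_other (m k p : Int) (h1 : 1 <= p) (h2 : 2 * p + 2 <= m) (h3 : m <= 2 * p + 3)
    (hkp : k ≠ p) (hkm : k ≠ m) :
    pvRowM m k = pvRowM (m + 1) k := by
  have c2 : 2 * k + 2 ≠ m := by omega
  have c3 : 2 * k + 3 ≠ m := by omega
  simp only [pvRowM, pvChildren]
  generalize PySem.Int.floordiv (k - 2) 2 = q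
  split_ifs <;> first | rfl | omega

theorem step_eq (N m : Int) (hm : 4 <= m) (hmN : m < N) :
    pvStepB ((PySem.List.pyRange 0 N 1).map (pvRowM m)) m
      = (PySem.List.pyRange 0 N 1).map (pvRowM (m + 1)) := by
  have hp : PySem.Int.floordiv (m - 2) 2 = (m - 2) / 2 :=
    PySem.Int.floordiv_eq_ediv_of_pos (by norm_num)
  show pvAppendAt (pvAppendAt ((PySem.List.pyRange 0 N 1).map (pvRowM m)) m
        (PySem.Int.floordiv (m - 2) 2)) (PySem.Int.floordiv (m - 2) 2) m
      = (PySem.List.pyRange 0 N 1).map (pvRowM (m + 1))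
  rw [pvAppendAt_map_pyRange N _ m _ (by omega) hmN,
      pvAppendAt_map_pyRange N _ _ m (by omega) (by omega)]
  refine List.map_congr_left (fun k hk => ?_)
  obtain ⟨hk0, hkN⟩ := PySem.List.mem_pyRange_one.mp hk
  by_cases hkp : k = PySem.Int.floordiv (m - 2) 2
  · subst hkp
    rw [if_pos rfl, if_neg (by omega)]
    exact rowM_at_p m _ (by omega) (by omega) (by omega)
  · rw [if_neg hkp]
    by_cases hkm : k = m
    · rw [if_pos hkm, hkm,
          show pvRowM m m = [] by simp only [pvRowM]; split_ifs <;> first | omega | rfl,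
          show pvRowM (m + 1) m = [PySem.Int.floordiv (m - 2) 2] by
            simp only [pvRowM, pvChildren]
            split_ifs <;> first | omega | simp]
      rfl
    · rw [if_neg hkm]
      exact rowM_other m k _ (by omega) (by omega) (by omega) hkp hkm

theorem loop_inv (N : Int) (_hN : 4 ≤ N) (t : Nat) (hm : 4 + (t : Int) ≤ N) :
    (PySem.List.pyRange 4 (4 + (t : Int)) 1).foldl pvStepB
        ((PySem.List.pyRange 0 N 1).map (pvRowM 4))
      = (PySem.List.pyRange 0 N 1).map (pvRowM (4 + (t : Int))) := by
  induction t with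
  | zero =>
    rw [show PySem.List.pyRange 4 (4 + ((0:Nat):Int)) 1 = [] from
          PySem.List.pyRange_one_eq_nil (by norm_num)]
    norm_num
  | succ k ih =>
    push_cast
    rw [show (4:Int) + ((k:Int) + 1) = (4 + (k:Int)) + 1 by ring,
        PySem.List.pyRange_one_succ_right (by omega), List.foldl_append,
        ih (by push_cast at hm; omega), List.foldl_cons, List.foldl_nil]
    exact step_eq N (4 + (k:Int)) (by omega) (by push_cast at hm; omega)

-- ===== VERDICT (by name: the statement is the Claim_ definition above) =====
theorem cayley_tree_spec : Claim_equal_cayley_tree := by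
  intro N _ hPre
  show cayley_tree N = cayley_tree_alt N
  have hPre' : (4 : Int) ≤ N := hPre
  unfold cayley_tree cayley_tree_alt
  rw [foldl_flatMap_children N _ (fun i hi => (PySem.List.mem_pyRange_one.mp hi).1)]
  obtain ⟨t, ht⟩ : ∃ t : Nat, N = 1 + (t : Int) := ⟨(N - 1).toNat, by omega⟩
  rw [show (PySem.List.pyRange 1 N 1).flatMap (pvChildren N)
        = PySem.List.pyRange 4 N 1 by
      rw [ht, flatMap_children_eq (1 + (t : Int)) (by omega) t,
          show min (2*(t:Int)+4) (1 + (t:Int)) = 1 + (t:Int) by omega]]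
  obtain ⟨s, hs⟩ : ∃ s : Nat, N = 4 + (s : Int) := ⟨(N - 4).toNat, by omega⟩
  rw [init_eq N hPre']
  have hloop := loop_inv N hPre' s (by omega)
  rw [← hs] at hloop
  rw [hloop]
  refine List.map_congr_left (fun k hk => ?_)
  obtain ⟨hk0, hkN⟩ := PySem.List.mem_pyRange_one.mp hk
  simp only [pvRowM, pvRow, pvChildren]
  split_ifs <;> simp_all
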